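-- pv_equiv track=rewrite | github.com/BuffJesus/X4POCreator | item_notes_flow.py | clear_notes_for_keys
-- ===== SOURCE A (Python) =====
-- def clear_notes_for_keys(notes, keys):
--     """Remove notes for the given (line_code, item_code) tuples."""
--     removed = 0
--     for lc, ic in keys:
--         k = f"{lc}:{ic}"
--         if k in notes:
--             del notes[k]
--             removed += 1
--     return removed
-- ===== SOURCE B (Python) =====
-- def clear_notes_for_keys(notes, keys):
--     """Remove notes for the given (line_code, item_code) tuples."""
--     target = {f"{lc}:{ic}" for lc, ic in keys}
--     present = target & notes.keys()
--     for k in present: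
--         del notes[k]
--     return len(present)
-- ===== Notes on version B (the rewrite author's own statement) =====
-- stated objective: alternative
-- what changed: Replaces the interleaved test-delete-count loop over keys with an up-front set of target key strings intersected with the dict's keys, then a separate delete pass; the count is the size of the intersection.
import Mathlib
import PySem

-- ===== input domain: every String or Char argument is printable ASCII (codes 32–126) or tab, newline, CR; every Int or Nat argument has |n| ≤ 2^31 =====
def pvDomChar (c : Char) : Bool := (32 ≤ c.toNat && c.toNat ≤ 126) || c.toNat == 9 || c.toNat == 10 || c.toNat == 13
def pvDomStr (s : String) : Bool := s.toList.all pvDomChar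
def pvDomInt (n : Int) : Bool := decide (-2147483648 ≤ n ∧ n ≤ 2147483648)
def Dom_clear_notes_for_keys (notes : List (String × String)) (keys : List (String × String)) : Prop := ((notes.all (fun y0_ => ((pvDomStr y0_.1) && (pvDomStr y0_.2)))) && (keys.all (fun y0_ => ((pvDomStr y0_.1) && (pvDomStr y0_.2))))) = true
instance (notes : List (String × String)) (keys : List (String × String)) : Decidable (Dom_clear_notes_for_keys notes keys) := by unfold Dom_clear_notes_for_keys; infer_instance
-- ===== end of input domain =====

-- B replaces A's interleaved test-delete-count loop over keys with an up-front target key-string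
-- set intersected with the dict's keys (objective: alternative decomposition, same cost).
-- Both Pythons delete the same entries from `notes` in place; the equivalence proved here is about
-- the RETURN value (the count of removed keys).

-- ===== PORT A =====
-- A: one loop over keys, testing membership, deleting in place and counting.
def clear_notes_for_keys (notes : List (String × String)) (keys : List (String × String)) : Int :=
  (keys.foldl (fun (st : List (String × String) × Int) p =>
      let k := p.1 ++ ":" ++ p.2
      if st.1.any (fun q => q.1 == k) then
        (st.1.filter (fun q => q.1 != k), st.2 + 1)
      else st)
    (notes, 0)).2

-- ===== PORT B =====
-- B: target key-string set, intersected with the dict's keys; count = size of the intersection.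
def clear_notes_for_keys_alt (notes : List (String × String)) (keys : List (String × String)) : Int :=
  let target : PySem.Set String := PySem.Set.ofList (keys.map (fun p => p.1 ++ ":" ++ p.2))
  let present : PySem.Set String := PySem.Set.inter target (notes.map Prod.fst)
  (PySem.Set.len present : Int)

-- ===== PRECONDITION & SPEC =====
def Spec_clear_notes_for_keys (notes : List (String × String)) (keys : List (String × String)) (out : Int) : Prop := out = clear_notes_for_keys_alt notes keys
instance (notes : List (String × String)) (keys : List (String × String)) (out : Int) : Decidable (Spec_clear_notes_for_keys notes keys out) := by unfold Spec_clear_notes_for_keys; infer_instance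

-- ===== CLAIM (what is proved, stated in full; the proofs are below) =====
def Claim_equal_clear_notes_for_keys : Prop := ∀ (notes : List (String × String)) (keys : List (String × String)), Dom_clear_notes_for_keys notes keys → Spec_clear_notes_for_keys notes keys (clear_notes_for_keys notes keys)

-- ===== LEMMAS AND PROOFS =====

lemma cnfk_keys_filter_contains (ns : List (String × String)) (k x : String) :
    (List.map Prod.fst (ns.filter (fun q => q.1 != k))).contains x
      = (((List.map Prod.fst ns).contains x) && (x != k)) := by
  rw [Bool.eq_iff_iff]
  simp only [List.contains_iff_mem, List.mem_map, List.mem_filter, Bool.and_eq_true,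
    bne_iff_ne, ne_eq]
  constructor
  · rintro ⟨q, ⟨hq, hne⟩, rfl⟩; exact ⟨⟨q, hq, rfl⟩, hne⟩
  · rintro ⟨⟨q, hq, rfl⟩, hne⟩; exact ⟨q, ⟨hq, hne⟩, rfl⟩

lemma cnfk_any_eq_contains (ns : List (String × String)) (k : String) :
    ns.any (fun q => q.1 == k) = (List.map Prod.fst ns).contains k := by
  rw [Bool.eq_iff_iff]
  simp [List.any_eq_true, List.mem_map]

lemma cnfk_main (ks : List (String × String)) :
    ∀ (ns : List (String × String)) (c : Int),
    (ks.foldl (fun (st : List (String × String) × Int) p =>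
        let k := p.1 ++ ":" ++ p.2
        if st.1.any (fun q => q.1 == k) then
          (st.1.filter (fun q => q.1 != k), st.2 + 1)
        else st)
      (ns, c)).2
    = c + (((PySem.Set.ofList (ks.map (fun p => p.1 ++ ":" ++ p.2))).filter
        (fun k => (ns.map Prod.fst).contains k)).length : Int) := by
  induction ks with
  | nil => intro ns c; simp [PySem.Set.ofList]
  | cons p rest ih =>
    intro ns c
    simp only [List.foldl_cons, List.map_cons]
    by_cases h : ns.any (fun q => q.1 == (p.1 ++ ":" ++ p.2))
    · have hc : (List.map Prod.fst ns).contains (p.1 ++ ":" ++ p.2) = true := by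
        rw [← cnfk_any_eq_contains]; exact h
      simp only [h, if_true, ih]
      rw [PySem.Set.ofList_cons, List.filter_cons, hc]
      simp only [if_true, List.length_cons, PySem.Set.discard, List.filter_filter]
      rw [List.filter_congr (fun x _ => cnfk_keys_filter_contains ns (p.1 ++ ":" ++ p.2) x)]
      have hfe : List.filter (fun x => (List.map Prod.fst ns).contains x && (x != p.1 ++ ":" ++ p.2))
            (PySem.Set.ofList (List.map (fun p => p.1 ++ ":" ++ p.2) rest))
          = List.filter (fun a => (List.map Prod.fst ns).contains a && !(a == p.1 ++ ":" ++ p.2))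
            (PySem.Set.ofList (List.map (fun p => p.1 ++ ":" ++ p.2) rest)) :=
        List.filter_congr (fun x _ => by simp [bne])
      rw [hfe]
      push_cast
      ring
    · have hc : (List.map Prod.fst ns).contains (p.1 ++ ":" ++ p.2) = false := by
        rw [← cnfk_any_eq_contains]; exact Bool.eq_false_iff.mpr (fun hh => h hh)
      rw [if_neg h, ih]
      rw [PySem.Set.ofList_cons, List.filter_cons, hc]
      simp only [Bool.false_eq_true, if_false, PySem.Set.discard, List.filter_filter]
      have hfe : List.filter (fun a => (List.map Prod.fst ns).contains a && !(a == p.1 ++ ":" ++ p.2))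
            (PySem.Set.ofList (List.map (fun p => p.1 ++ ":" ++ p.2) rest))
          = List.filter (fun k => (List.map Prod.fst ns).contains k)
            (PySem.Set.ofList (List.map (fun p => p.1 ++ ":" ++ p.2) rest)) := by
        apply List.filter_congr
        intro x _
        by_cases hx : (List.map Prod.fst ns).contains x = true
        · have hxk : (!(x == p.1 ++ ":" ++ p.2)) = true := by
            rcases eq_or_ne x (p.1 ++ ":" ++ p.2) with rfl | hne
            · rw [hx] at hc; cases hc
            · simpa using hne
          rw [hx, hxk]; rfl
        · rw [Bool.not_eq_true] at hx; rw [hx]; simp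
      rw [hfe]


-- ===== VERDICT (by name: the statement is the Claim_ definition above) =====
theorem clear_notes_for_keys_spec : Claim_equal_clear_notes_for_keys := by
  intro notes keys _
  unfold Spec_clear_notes_for_keys clear_notes_for_keys clear_notes_for_keys_alt
  rw [cnfk_main]
  simp [PySem.Set.inter, PySem.Set.len]
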